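-- pv_equiv track=rewrite | github.com/rodionov-alex/InformaticsPython | _2023/#4/lib4.py | check_phano
-- ===== SOURCE A (Python) =====
-- def check_phano(values, phano):
--     ln = len(values)
--
--     # Прямое условие Фано
--     if phano >= 0:
--         for i in range(ln - 1):
--             for j in range(i + 1, ln):
--                 if values[i].startswith(values[j]) or values[j].startswith(values[i]):
--                     break
--             else:
--                 continue
--             break
--         else:
--             return True
--
--     # Обратное условие Фано
--     if phano <= 0:
--         for i in range(ln - 1):
--             for j in range(i + 1, ln):
--                 if values[i].endswith(values[j]) or values[j].endswith(values[i]):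
--                     break
--             else:
--                 continue
--             break
--         else:
--             return True
--
--     return False
-- ===== SOURCE B (Python) =====
-- def check_phano(values, phano):
--     # Hash-set based: a clash exists iff some word occurs twice or a proper
--     # prefix of some word is itself a word; suffixes via reversed strings.
--     def has_clash(vs):
--         s = set(vs)
--         if len(s) < len(vs):
--             return True
--         return any(w[:k] in s for w in vs for k in range(len(w)))
--
--     if phano >= 0 and not has_clash(values):
--         return True
--     if phano <= 0 and not has_clash([w[::-1] for w in values]):
--         return True
--     return False
-- ===== Notes on version B (the rewrite author's own statement) =====
-- stated objective: alternative
-- what changed: Replaces the all-pairs startswith/endswith double loops by a hash set of the words: a clash exists iff some word repeats or a proper prefix of a word (reversed words for the suffix test) is itself in the set.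
import Mathlib
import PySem

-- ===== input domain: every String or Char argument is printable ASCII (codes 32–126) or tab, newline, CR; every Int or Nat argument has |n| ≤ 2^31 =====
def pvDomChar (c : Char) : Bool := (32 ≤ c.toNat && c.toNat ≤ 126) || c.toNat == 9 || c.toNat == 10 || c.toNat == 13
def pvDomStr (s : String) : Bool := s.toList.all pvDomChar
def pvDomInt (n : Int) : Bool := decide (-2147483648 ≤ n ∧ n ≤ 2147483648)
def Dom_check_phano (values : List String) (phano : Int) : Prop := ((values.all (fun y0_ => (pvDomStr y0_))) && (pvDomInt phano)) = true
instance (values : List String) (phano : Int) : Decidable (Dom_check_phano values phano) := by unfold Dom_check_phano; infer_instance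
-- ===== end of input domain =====

-- B replaces A's all-pairs startswith/endswith scans by one hash-set of the words:
-- a clash exists iff some word repeats or a proper prefix of a word is itself a word
-- (suffixes via reversed words), removing the inner scan over other words.

-- ===== PORT A =====
-- the nested 'for i … for j … startswith' loop with its break/else (true on break)
def pyPrefBad (values : List String) : Bool :=
  (PySem.List.pyRange 0 ((values.length : Int) - 1) 1).any (fun i =>
    (PySem.List.pyRange (i + 1) (values.length : Int) 1).any (fun j =>
      PySem.Str.startswith (PySem.List.pyGetD values i "") (PySem.List.pyGetD values j "")
      || PySem.Str.startswith (PySem.List.pyGetD values j "") (PySem.List.pyGetD values i "")))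

-- the nested 'for i … for j … endswith' loop with its break/else (true on break)
def pySufBad (values : List String) : Bool :=
  (PySem.List.pyRange 0 ((values.length : Int) - 1) 1).any (fun i =>
    (PySem.List.pyRange (i + 1) (values.length : Int) 1).any (fun j =>
      PySem.Str.endswith (PySem.List.pyGetD values i "") (PySem.List.pyGetD values j "")
      || PySem.Str.endswith (PySem.List.pyGetD values j "") (PySem.List.pyGetD values i "")))

def check_phano (values : List String) (phano : Int) : Bool :=
  if decide (0 ≤ phano) && !pyPrefBad values then true
  else if decide (phano ≤ 0) && !pySufBad values then true
  else false

-- ===== PORT B =====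
-- Source B's has_clash: s = set(vs); duplicate check by size, then proper prefixes against s
def pvClash (vs : List String) : Bool :=
  let s : PySem.Set String := PySem.Set.ofList vs
  if PySem.Set.len s < (vs.length : Int) then true
  else vs.any (fun w =>
    (PySem.List.pyRange 0 (PySem.Str.len w) 1).any (fun k =>
      PySem.Set.contains s (PySem.Str.slice w none (some k))))

-- w[::-1]
def pvRev (w : String) : String := (PySem.Str.slice? w none none (-1)).getD ""

def check_phano_alt (values : List String) (phano : Int) : Bool :=
  if decide (0 ≤ phano) && !pvClash values then true
  else if decide (phano ≤ 0) && !pvClash (values.map pvRev) then true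
  else false

-- ===== PRECONDITION & SPEC =====
def Spec_check_phano (values : List String) (phano : Int) (out : Bool) : Prop := out = check_phano_alt values phano
instance (values : List String) (phano : Int) (out : Bool) : Decidable (Spec_check_phano values phano out) := by unfold Spec_check_phano; infer_instance

-- ===== CLAIM (what is proved, stated in full; the proofs are below) =====
def Claim_equal_check_phano : Prop := ∀ (values : List String) (phano : Int), Dom_check_phano values phano → Spec_check_phano values phano (check_phano values phano)

-- ===== LEMMAS AND PROOFS =====

-- some pair (i < j) where one word is a prefix of the other
def PairPref (vs : List String) : Prop :=
  ∃ i j, ∃ (hi : i < vs.length) (hj : j < vs.length), i < j ∧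
    ((vs[j]'hj).toList <+: (vs[i]'hi).toList ∨ (vs[i]'hi).toList <+: (vs[j]'hj).toList)

-- some pair (i < j) where one word is a suffix of the other
def PairSuf (vs : List String) : Prop :=
  ∃ i j, ∃ (hi : i < vs.length) (hj : j < vs.length), i < j ∧
    ((vs[j]'hj).toList <:+ (vs[i]'hi).toList ∨ (vs[i]'hi).toList <:+ (vs[j]'hj).toList)

-- what B's has_clash detects: a duplicate, or a proper prefix of a word being a word
def ClashP (vs : List String) : Prop :=
  ¬ vs.Nodup ∨ ∃ i, ∃ (hi : i < vs.length), ∃ k, k < (vs[i]'hi).toList.length ∧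
    ∃ j, ∃ (hj : j < vs.length), (vs[j]'hj).toList = (vs[i]'hi).toList.take k

lemma pvClash_eq (vs : List String) : pvClash vs =
    (if PySem.Set.len (PySem.Set.ofList vs) < (vs.length : Int) then true
     else vs.any (fun w =>
       (PySem.List.pyRange 0 (PySem.Str.len w) 1).any (fun k =>
         PySem.Set.contains (PySem.Set.ofList vs) (PySem.Str.slice w none (some k))))) := rfl

lemma ofList_len_lt_iff (vs : List String) :
    (PySem.Set.ofList vs).length < vs.length ↔ ¬ vs.Nodup := by
  have h1 : (PySem.Set.ofList vs).toFinset = vs.toFinset := by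
    ext x; simp [List.mem_toFinset, PySem.Set.mem_ofList]
  have h2 : (PySem.Set.ofList vs).length = vs.dedup.length := by
    rw [← List.toFinset_card_of_nodup (PySem.Set.nodup_ofList vs), h1, List.card_toFinset]
  have h3 : vs.dedup.length ≤ vs.length := (List.dedup_sublist vs).length_le
  constructor
  · intro h hnd
    rw [h2, List.dedup_eq_self.mpr hnd] at h
    omega
  · intro h
    rcases Nat.lt_or_ge ((PySem.Set.ofList vs).length) vs.length with hlt | hge
    · exact hlt
    · exact absurd (List.dedup_eq_self.mp ((List.dedup_sublist vs).eq_of_length (by omega))) h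

lemma pyPrefBad_iff (vs : List String) : pyPrefBad vs = true ↔ PairPref vs := by
  unfold pyPrefBad PairPref
  constructor
  · intro h
    obtain ⟨i, hi, h⟩ := List.any_eq_true.mp h
    rw [PySem.List.mem_pyRange_one] at hi
    obtain ⟨j, hj, h⟩ := List.any_eq_true.mp h
    rw [PySem.List.mem_pyRange_one] at hj
    rw [PySem.List.pyGetD_eq_getElem vs "" hi.1 (by omega),
        PySem.List.pyGetD_eq_getElem vs "" (by omega) (by omega)] at h
    refine ⟨i.toNat, j.toNat, by omega, by omega, by omega, ?_⟩
    simpa [PySem.Str.startswith_eq, PySem.Chars.startswith_iff] using h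
  · rintro ⟨i, j, hi, hj, hij, h⟩
    rw [List.any_eq_true]
    refine ⟨(i : Int), PySem.List.mem_pyRange_one.mpr ⟨by omega, by omega⟩, ?_⟩
    rw [List.any_eq_true]
    refine ⟨(j : Int), PySem.List.mem_pyRange_one.mpr ⟨by omega, by omega⟩, ?_⟩
    rw [PySem.List.pyGetD_eq_getElem vs "" (by omega) (by omega),
        PySem.List.pyGetD_eq_getElem vs "" (by omega) (by omega)]
    simp only [Int.toNat_natCast]
    simp only [PySem.Str.startswith_eq, Bool.or_eq_true, PySem.Chars.startswith_iff]
    exact h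

lemma pySufBad_iff (vs : List String) : pySufBad vs = true ↔ PairSuf vs := by
  unfold pySufBad PairSuf
  constructor
  · intro h
    obtain ⟨i, hi, h⟩ := List.any_eq_true.mp h
    rw [PySem.List.mem_pyRange_one] at hi
    obtain ⟨j, hj, h⟩ := List.any_eq_true.mp h
    rw [PySem.List.mem_pyRange_one] at hj
    rw [PySem.List.pyGetD_eq_getElem vs "" hi.1 (by omega),
        PySem.List.pyGetD_eq_getElem vs "" (by omega) (by omega)] at h
    refine ⟨i.toNat, j.toNat, by omega, by omega, by omega, ?_⟩
    simpa [PySem.Str.endswith_eq, PySem.Chars.endswith_iff] using h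
  · rintro ⟨i, j, hi, hj, hij, h⟩
    rw [List.any_eq_true]
    refine ⟨(i : Int), PySem.List.mem_pyRange_one.mpr ⟨by omega, by omega⟩, ?_⟩
    rw [List.any_eq_true]
    refine ⟨(j : Int), PySem.List.mem_pyRange_one.mpr ⟨by omega, by omega⟩, ?_⟩
    rw [PySem.List.pyGetD_eq_getElem vs "" (by omega) (by omega),
        PySem.List.pyGetD_eq_getElem vs "" (by omega) (by omega)]
    simp only [Int.toNat_natCast]
    simp only [PySem.Str.endswith_eq, Bool.or_eq_true, PySem.Chars.endswith_iff]
    exact h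

lemma pvClash_iff (vs : List String) : pvClash vs = true ↔ ClashP vs := by
  rw [pvClash_eq]
  unfold ClashP
  split_ifs with hlt
  · have hlt' : (PySem.Set.ofList vs).length < vs.length := by
      simpa [PySem.Set.len] using hlt
    constructor
    · intro _; exact Or.inl ((ofList_len_lt_iff vs).mp hlt')
    · intro _; rfl
  · have hnd : vs.Nodup := by
      by_contra h
      exact hlt (by simpa [PySem.Set.len] using Int.ofNat_lt.mpr ((ofList_len_lt_iff vs).mpr h))
    constructor
    · intro h
      obtain ⟨w, hw, h⟩ := List.any_eq_true.mp h
      obtain ⟨k, hk, h⟩ := List.any_eq_true.mp h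
      rw [PySem.List.mem_pyRange_one] at hk
      rw [PySem.Str.len_eq] at hk
      have hmem : PySem.Str.slice w none (some k) ∈ PySem.Set.ofList vs := by
        simpa [PySem.Set.contains] using h
      rw [PySem.Set.mem_ofList] at hmem
      obtain ⟨j, hj, hje⟩ := List.mem_iff_getElem.mp hmem
      obtain ⟨i, hi, hie⟩ := List.mem_iff_getElem.mp hw
      refine Or.inr ⟨i, hi, k.toNat, ?_, j, hj, ?_⟩
      · rw [hie]; omega
      · rw [hje, hie, PySem.Str.toList_slice, PySem.Chars.slice_eq_listSlice,
            PySem.List.slice_to _ hk.1]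
    · rintro (h | ⟨i, hi, k, hk, j, hj, he⟩)
      · exact absurd hnd h
      · rw [List.any_eq_true]
        refine ⟨vs[i], List.getElem_mem _, ?_⟩
        rw [List.any_eq_true]
        refine ⟨(k : Int), PySem.List.mem_pyRange_one.mpr
          ⟨by omega, by rw [PySem.Str.len_eq]; omega⟩, ?_⟩
        have hs : PySem.Str.slice (vs[i]'hi) none (some (k : Int)) = vs[j]'hj := by
          apply String.toList_inj.mp
          rw [PySem.Str.toList_slice, PySem.Chars.slice_eq_listSlice,
              PySem.List.slice_to _ (by omega : (0:Int) ≤ (k:Int))]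
          simp [he]
        rw [hs]
        simp [PySem.Set.contains, PySem.Set.mem_ofList]
    
lemma pairPref_iff_clash (vs : List String) : PairPref vs ↔ ClashP vs := by
  constructor
  · rintro ⟨i, j, hi, hj, hij, h⟩
    have main : ∀ a b (ha : a < vs.length) (hb : b < vs.length), a ≠ b →
        (vs[b]'hb).toList <+: (vs[a]'ha).toList → ClashP vs := by
      intro a b ha hb hne hp
      by_cases he : (vs[b]'hb) = (vs[a]'ha)
      · exact Or.inl (fun hnd => hne ((hnd.getElem_inj_iff.mp he).symm))
      · refine Or.inr ⟨a, ha, (vs[b]'hb).toList.length, ?_, b, hb, List.prefix_iff_eq_take.mp hp⟩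
        rcases lt_or_eq_of_le hp.length_le with h' | h'
        · exact h'
        · exact absurd (String.toList_inj.mp (hp.eq_of_length h')) he
    rcases h with h | h
    · exact main i j hi hj (by omega) h
    · exact main j i hj hi (by omega) h
  · rintro (h | ⟨i, hi, k, hk, j, hj, he⟩)
    · rw [List.nodup_iff_injective_getElem] at h
      obtain ⟨a, b, hab, hne⟩ := Function.not_injective_iff.mp h
      rcases Nat.lt_trichotomy a.1 b.1 with hlt | heq | hgt
      · exact ⟨a.1, b.1, a.2, b.2, hlt, Or.inl (by rw [← hab])⟩
      · exact absurd (Fin.ext heq) hne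
      · exact ⟨b.1, a.1, b.2, a.2, hgt, Or.inl (by rw [hab])⟩
    · have hp : (vs[j]'hj).toList <+: (vs[i]'hi).toList := he ▸ List.take_prefix _ _
      have hne : j ≠ i := by
        intro hji
        subst hji
        have := congrArg List.length he
        rw [List.length_take] at this
        omega
      rcases Nat.lt_trichotomy i j with hlt | heq | hgt
      · exact ⟨i, j, hi, hj, hlt, Or.inl hp⟩
      · exact absurd heq.symm hne
      · exact ⟨j, i, hj, hi, hgt, Or.inr hp⟩

lemma pvRev_toList (w : String) : (pvRev w).toList = w.toList.reverse := by
  unfold pvRev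
  rw [PySem.Str.slice?_none_none_neg_one]
  simp [String.toList_ofList]

lemma pairSuf_iff (vs : List String) : PairSuf vs ↔ PairPref (vs.map pvRev) := by
  unfold PairSuf PairPref
  simp only [List.length_map, List.getElem_map, pvRev_toList, List.reverse_prefix]

lemma prefBad_eq_clash (vs : List String) : pyPrefBad vs = pvClash vs :=
  Bool.eq_iff_iff.mpr (by rw [pyPrefBad_iff, pvClash_iff]; exact pairPref_iff_clash vs)

lemma sufBad_eq_clash (vs : List String) : pySufBad vs = pvClash (vs.map pvRev) :=
  Bool.eq_iff_iff.mpr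
    (by rw [pySufBad_iff, pvClash_iff]; exact (pairSuf_iff vs).trans (pairPref_iff_clash _))

-- ===== VERDICT (by name: the statement is the Claim_ definition above) =====
theorem check_phano_spec : Claim_equal_check_phano := by
  unfold Claim_equal_check_phano
  intro values phano _
  unfold Spec_check_phano check_phano check_phano_alt
  rw [prefBad_eq_clash, sufBad_eq_clash]
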